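-- pv_equiv track=rewrite | github.com/richanco/recipe-book | src/web/recipe_search.py | group_extraction
-- ===== SOURCE A (Python) =====
-- from typing import List
--
-- def group_extraction(group:List[tuple], ingredients:tuple[str])->bool:
--     """指定の材料が全て存在するか判定
--
--     Args:
--         group (List[tuple]): _description_
--         ingredients (tuple[str]): _description_
--
--     Returns:
--         bool: _description_
--     """
--     judge_list = []
--     for ingredient in ingredients:
--         bool_list = []
--         for item in group:
--             bool_list.append(ingredient in item[3])
--         judge_list.append(any(bool_list))
--     return  all(judge_list)
-- ===== SOURCE B (Python) =====
-- from typing import List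
--
-- def group_extraction(group:List[tuple], ingredients:tuple[str])->bool:
--     """Substring-index approach: build a set of ALL contiguous substrings of
--     every item's fourth field once, then answer each ingredient by a single
--     set lookup (no per-ingredient scan over the group)."""
--     index = set()
--     for item in group:
--         s = item[3]
--         n = len(s)
--         for i in range(n + 1):
--             for j in range(i, n + 1):
--                 index.add(s[i:j])
--     return all(ingredient in index for ingredient in ingredients)
-- ===== Notes on version B (the rewrite author's own statement) =====
-- stated objective: alternative
-- what changed: B replaces A's per-ingredient scan of the group (substring test against every item) by a substring index: one pass enumerates all contiguous substrings of every item's fourth field into a set, after which each ingredient is answered by a single set lookup.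
import Mathlib
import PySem

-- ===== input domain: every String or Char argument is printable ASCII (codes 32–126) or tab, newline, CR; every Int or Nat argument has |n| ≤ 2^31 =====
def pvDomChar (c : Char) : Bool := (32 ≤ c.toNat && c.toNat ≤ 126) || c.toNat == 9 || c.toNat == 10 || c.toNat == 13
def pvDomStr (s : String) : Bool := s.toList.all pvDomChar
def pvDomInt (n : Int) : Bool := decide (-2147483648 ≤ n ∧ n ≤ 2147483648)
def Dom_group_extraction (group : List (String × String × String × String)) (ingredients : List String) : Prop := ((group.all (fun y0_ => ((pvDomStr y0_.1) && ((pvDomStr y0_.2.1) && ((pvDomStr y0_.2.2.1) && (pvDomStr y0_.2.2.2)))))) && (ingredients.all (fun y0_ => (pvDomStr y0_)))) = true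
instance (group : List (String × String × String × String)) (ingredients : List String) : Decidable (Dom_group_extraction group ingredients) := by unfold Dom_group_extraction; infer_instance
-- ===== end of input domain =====

-- B replaces A's per-ingredient scan of the group by a substring index: one pass enumerates
-- all contiguous substrings of every item's fourth field into a set, then each ingredient is
-- answered by a single set lookup (alternative algorithm/data structure; not claimed faster).


-- ===== PORT A =====
-- A: per ingredient build bool_list over the group, judge_list collects the any()s, return all().
def group_extraction (group : List (String × String × String × String)) (ingredients : List String) : Bool :=
  (ingredients.foldl
    (fun judge_list ingredient =>
      judge_list ++
        [(group.foldl (fun bool_list item =>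
            bool_list ++ [PySem.Str.isIn ingredient item.2.2.2]) []).any id])
    []).all id

-- ===== PORT B =====
-- B: build the set of all contiguous substrings s[i:j] of every item's fourth field, then
-- answer each ingredient by a single set-membership lookup.
def group_extraction_alt (group : List (String × String × String × String)) (ingredients : List String) : Bool :=
  let index : PySem.Set String :=
    group.foldl
      (fun index item =>
        (PySem.List.pyRange 0 (PySem.Str.len item.2.2.2 + 1) 1).foldl
          (fun index i =>
            (PySem.List.pyRange i (PySem.Str.len item.2.2.2 + 1) 1).foldl
              (fun index j => PySem.Set.add index (PySem.Str.slice item.2.2.2 (some i) (some j)))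
              index)
          index)
      PySem.Set.empty
  ingredients.all (fun ingredient => PySem.Set.contains index ingredient)

-- ===== PRECONDITION & SPEC =====
def Spec_group_extraction (group : List (String × String × String × String)) (ingredients : List String) (out : Bool) : Prop := out = group_extraction_alt group ingredients
instance (group : List (String × String × String × String)) (ingredients : List String) (out : Bool) : Decidable (Spec_group_extraction group ingredients out) := by unfold Spec_group_extraction; infer_instance

-- ===== CLAIM (what is proved, stated in full; the proofs are below) =====
def Claim_equal_group_extraction : Prop := ∀ (group : List (String × String × String × String)) (ingredients : List String), Dom_group_extraction group ingredients → Spec_group_extraction group ingredients (group_extraction group ingredients)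

-- ===== LEMMAS AND PROOFS =====

-- membership in a fold that only enlarges the set, given a membership law for the body
theorem pv_foldl_mem {ι : Type} (L : List ι) (g : PySem.Set String → ι → PySem.Set String)
    (P : ι → String → Prop)
    (h : ∀ idx i x, x ∈ g idx i ↔ x ∈ idx ∨ P i x) :
    ∀ (idx : PySem.Set String) (x : String),
      x ∈ L.foldl g idx ↔ x ∈ idx ∨ ∃ i ∈ L, P i x := by
  induction L with
  | nil => simp
  | cons a L ih =>
    intro idx x
    simp only [List.foldl_cons, ih, h, List.mem_cons]
    constructor
    · rintro ((hx | hp) | ⟨i, hi, hp⟩)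
      · exact Or.inl hx
      · exact Or.inr ⟨a, Or.inl rfl, hp⟩
      · exact Or.inr ⟨i, Or.inr hi, hp⟩
    · rintro (hx | ⟨i, (rfl | hi), hp⟩)
      · exact Or.inl (Or.inl hx)
      · exact Or.inl (Or.inr hp)
      · exact Or.inr ⟨i, hi, hp⟩

-- the slices s[i:j] over 0 ≤ i ≤ j ≤ len(s) are exactly the infixes of s
theorem pv_slice_iff_infix (s x : String) :
    (∃ i ∈ PySem.List.pyRange 0 (PySem.Str.len s + 1) 1,
      ∃ j ∈ PySem.List.pyRange i (PySem.Str.len s + 1) 1,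
        x = PySem.Str.slice s (some i) (some j)) ↔ PySem.Str.isIn x s = true := by
  rw [PySem.Str.isIn_iff_infix]
  constructor
  · rintro ⟨i, hi, j, hj, rfl⟩
    rw [PySem.List.mem_pyRange_one] at hi hj
    rw [PySem.Str.toList_slice]
    show PySem.List.slice s.toList (some i) (some j) <:+: s.toList
    rw [PySem.List.slice_toNat s.toList hi.1 (le_trans hi.1 hj.1)]
    exact List.infix_iff_prefix_suffix.mpr
      ⟨s.toList.drop i.toNat, List.take_prefix _ _, List.drop_suffix _ _⟩
  · intro h
    obtain ⟨u, v, huv⟩ := h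
    have hlen : s.toList.length = u.length + x.toList.length + v.length := by
      rw [← huv]; simp; omega
    refine ⟨(u.length : Int), ?_, (u.length : Int) + (x.toList.length : Int), ?_, ?_⟩
    · rw [PySem.List.mem_pyRange_one, PySem.Str.len_eq]
      constructor
      · positivity
      · omega
    · rw [PySem.List.mem_pyRange_one, PySem.Str.len_eq]
      constructor
      · omega
      · omega
    · apply String.toList_inj.mp
      rw [PySem.Str.toList_slice]
      show x.toList = PySem.List.slice s.toList _ _
      have hcast : (u.length : Int) + (x.toList.length : Int) = ((u.length + x.toList.length : Nat) : Int) := by push_cast; ring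
      rw [hcast, PySem.List.slice_natCast]
      rw [← huv, List.append_assoc, List.drop_left, Nat.add_sub_cancel_left, List.take_left]

-- membership in the whole index
theorem pv_mem_index (group : List (String × String × String × String))
    (idx : PySem.Set String) (x : String) :
    x ∈ group.foldl
        (fun index item =>
          (PySem.List.pyRange 0 (PySem.Str.len item.2.2.2 + 1) 1).foldl
            (fun index i =>
              (PySem.List.pyRange i (PySem.Str.len item.2.2.2 + 1) 1).foldl
                (fun index j => PySem.Set.add index (PySem.Str.slice item.2.2.2 (some i) (some j)))
                index)
            index)
        idx
      ↔ x ∈ idx ∨ ∃ item ∈ group, PySem.Str.isIn x item.2.2.2 = true := by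
  apply pv_foldl_mem
  intro idx item x
  rw [pv_foldl_mem _ _ (fun i x => ∃ j ∈ PySem.List.pyRange i (PySem.Str.len item.2.2.2 + 1) 1,
        x = PySem.Str.slice item.2.2.2 (some i) (some j))]
  · rw [pv_slice_iff_infix]
  · intro idx i x
    rw [pv_foldl_mem _ _ (fun j x => x = PySem.Str.slice item.2.2.2 (some i) (some j))]
    intro idx j x
    exact PySem.Set.mem_add idx _ x

-- ===== VERDICT (by name: the statement is the Claim_ definition above) =====
theorem group_extraction_spec : Claim_equal_group_extraction := by
  intro group ingredients _
  unfold Spec_group_extraction group_extraction group_extraction_alt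
  simp only [PySem.List.foldl_append_singleton_eq_map, List.nil_append]
  rw [Bool.eq_iff_iff, List.all_eq_true, List.all_eq_true]
  constructor
  · intro h ing hing
    have := h _ (List.mem_map_of_mem hing)
    simp only [List.any_eq_true, id, List.mem_map] at this
    obtain ⟨b, ⟨item, hitem, rfl⟩, hbt⟩ := this
    rw [PySem.Set.contains_iff, pv_mem_index]
    exact Or.inr ⟨item, hitem, hbt⟩
  · intro h b hb
    rw [List.mem_map] at hb
    obtain ⟨ing, hing, rfl⟩ := hb
    have := h ing hing
    rw [PySem.Set.contains_iff, pv_mem_index] at this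
    rcases this with hf | ⟨item, hitem, hx⟩
    · simp [PySem.Set.empty] at hf
    · simp only [List.any_eq_true, id, List.mem_map]
      exact ⟨_, ⟨item, hitem, rfl⟩, hx⟩
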